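-- pv_equiv track=rewrite | github.com/xashru/punctuation-restoration | data processing/sr_data/get_dev_from_restored_train.py | convert_word
-- ===== SOURCE A (Python) =====
-- def convert_word(text):
-- 	t = text.strip()
-- 	if t == '':
-- 		return ''
--
-- 	# get first punctuation
-- 	for i in range(len(t)):
-- 		if t[i] == ',':
-- 			return t[:i] + "\t" + "COMMA"
-- 		elif t[i]== '.':
-- 			return t[:i] + "\t" + "PERIOD"
-- 		elif t[i] == '?':
-- 			return t[:i] + "\t" + "QUESTION"
--
-- 	return t + "\t" + "O"
-- ===== SOURCE B (Python) =====
-- def convert_word(text):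
--     t = text.strip()
--     if t == '':
--         return ''
--     labels = [(',', 'COMMA'), ('.', 'PERIOD'), ('?', 'QUESTION')]
--     cands = [(t.find(c), lab) for c, lab in labels]
--     cands = [p for p in cands if p[0] != -1]
--     if not cands:
--         return t + '\t' + 'O'
--     i, lab = min(cands, key=lambda p: p[0])
--     return t[:i] + '\t' + lab
-- ===== Notes on version B (the rewrite author's own statement) =====
-- stated objective: faster
-- what changed: Replaces the per-character Python loop with three str.find calls whose non-negative results are filtered and the minimum-index candidate picked from a label table.
import Mathlib
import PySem

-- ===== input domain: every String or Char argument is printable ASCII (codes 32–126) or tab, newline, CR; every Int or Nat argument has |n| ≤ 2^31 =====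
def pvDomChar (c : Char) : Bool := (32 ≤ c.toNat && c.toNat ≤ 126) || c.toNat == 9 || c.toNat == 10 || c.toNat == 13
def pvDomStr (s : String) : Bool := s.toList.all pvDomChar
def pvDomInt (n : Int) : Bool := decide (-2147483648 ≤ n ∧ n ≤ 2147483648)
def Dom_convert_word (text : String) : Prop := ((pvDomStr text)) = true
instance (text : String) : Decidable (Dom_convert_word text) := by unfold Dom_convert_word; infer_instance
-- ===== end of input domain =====

-- B replaces A's per-character scan with three str.find calls, filtered for hits and resolved
-- by minimum index through a label table (measured faster: C-level find vs a Python char loop).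

-- ===== PORT A =====
-- the for-loop over range(len(t)): i is the loop index, rest = t.drop i the unscanned suffix
def convAux (t : String) (i : Nat) : List Char → String
  | [] => t ++ "\t" ++ "O"
  | c :: rest =>
    if c = ',' then String.ofList (PySem.Chars.slice t.toList none (some (i : Int))) ++ "\t" ++ "COMMA"
    else if c = '.' then String.ofList (PySem.Chars.slice t.toList none (some (i : Int))) ++ "\t" ++ "PERIOD"
    else if c = '?' then String.ofList (PySem.Chars.slice t.toList none (some (i : Int))) ++ "\t" ++ "QUESTION"
    else convAux t (i + 1) rest

def convert_word (text : String) : String :=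
  let t := PySem.Str.strip text
  if t = "" then ""
  else convAux t 0 t.toList

-- ===== PORT B =====
-- min(cands, key=lambda p: p[0]): first pair with strictly smallest first component
def minByFst (p : Int × String) (ps : List (Int × String)) : Int × String :=
  ps.foldl (fun b q => if q.1 < b.1 then q else b) p

def convert_word_alt (text : String) : String :=
  let t := PySem.Str.strip text
  if t = "" then ""
  else
    let cands := ([(PySem.Str.find t ",", "COMMA"), (PySem.Str.find t ".", "PERIOD"),
                   (PySem.Str.find t "?", "QUESTION")]).filter (fun p => p.1 ≠ -1)
    match cands with
    | [] => t ++ "\t" ++ "O"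
    | p :: ps =>
      let q := minByFst p ps
      String.ofList (PySem.Chars.slice t.toList none (some q.1)) ++ "\t" ++ q.2

-- ===== PRECONDITION & SPEC =====
def Spec_convert_word (text : String) (out : String) : Prop := out = convert_word_alt text
instance (text : String) (out : String) : Decidable (Spec_convert_word text out) := by unfold Spec_convert_word; infer_instance

-- ===== CLAIM (what is proved, stated in full; the proofs are below) =====
def Claim_equal_convert_word : Prop := ∀ (text : String), Dom_convert_word text → Spec_convert_word text (convert_word text)

-- ===== LEMMAS AND PROOFS =====

-- first punctuation of a char list, with its label (the common specification of both ports)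
def fp : List Char → Option (Nat × String)
  | [] => none
  | c :: rest =>
    if c = ',' then some (0, "COMMA")
    else if c = '.' then some (0, "PERIOD")
    else if c = '?' then some (0, "QUESTION")
    else (fp rest).map (fun p => (p.1 + 1, p.2))

-- B's candidate/filter/min computation, on the char list
def pick : List (Int × String) → Option (Int × String)
  | [] => none
  | p :: ps => some (minByFst p ps)

def fpB (l : List Char) : Option (Int × String) :=
  pick (([(PySem.Chars.find l [','], "COMMA"), (PySem.Chars.find l ['.'], "PERIOD"),
          (PySem.Chars.find l ['?'], "QUESTION")]).filter (fun p => p.1 ≠ -1))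

theorem singleton_prefix_iff (d : Char) (l : List Char) : [d] <+: l ↔ ∃ r, l = d :: r := by
  cases l with
  | nil => simp
  | cons c r =>
    constructor
    · rintro ⟨s, hs⟩
      rw [List.singleton_append] at hs
      injection hs with h1 h2
      exact ⟨r, by rw [h1]⟩
    · rintro ⟨r', hr⟩
      injection hr with h1 h2
      exact ⟨r', by simp [h1, h2]⟩

theorem find_eq_of (l sub : List Char) (n : Nat) (h1 : sub <+: l.drop n)
    (h2 : ∀ i < n, ¬ sub <+: l.drop i) : PySem.Chars.find l sub = n := by
  have hinf : sub <:+: l := (h1.isInfix).trans (l.drop_suffix n).isInfix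
  have hge : 0 ≤ PySem.Chars.find l sub := (PySem.Chars.find_nonneg_iff l sub).2 hinf
  obtain ⟨hp, hmin⟩ := PySem.Chars.find_spec hge
  have : (PySem.Chars.find l sub).toNat = n := by
    rcases Nat.lt_trichotomy (PySem.Chars.find l sub).toNat n with h | h | h
    · exact absurd hp (h2 _ h)
    · exact h
    · exact absurd h1 (hmin n h)
  omega

theorem find_singleton_cons (c d : Char) (l : List Char) :
    PySem.Chars.find (c :: l) [d] =
      if c = d then 0
      else if PySem.Chars.find l [d] = -1 then -1 else PySem.Chars.find l [d] + 1 := by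
  by_cases hc : c = d
  · subst hc
    rw [if_pos rfl]
    exact find_eq_of _ _ 0 ((singleton_prefix_iff _ _).2 ⟨l, rfl⟩) (by omega)
  · rw [if_neg hc]
    by_cases hf : PySem.Chars.find l [d] = -1
    · rw [if_pos hf]
      have hnot : ¬ [d] <:+: l := (PySem.Chars.find_eq_neg_one_iff l [d]).1 hf
      apply (PySem.Chars.find_eq_neg_one_iff _ _).2
      rw [List.singleton_infix_iff] at *
      simp [hnot, Ne.symm hc]
    · rw [if_neg hf]
      have hge : 0 ≤ PySem.Chars.find l [d] := by
        have := PySem.Chars.neg_one_le_find l [d]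
        omega
      obtain ⟨hp, hmin⟩ := PySem.Chars.find_spec hge
      set m := (PySem.Chars.find l [d]).toNat with hm
      have hfm : PySem.Chars.find l [d] = (m : Int) := by omega
      rw [hfm]
      have : PySem.Chars.find (c :: l) [d] = ((m + 1 : Nat) : Int) := by
        apply find_eq_of
        · simpa using hp
        · intro i hi
          cases i with
          | zero =>
            rw [singleton_prefix_iff]
            rintro ⟨r, hr⟩
            injection hr with hh _
            exact hc hh
          | succ j =>
            simpa using hmin j (by omega)
      rw [this]; push_cast; ring

theorem find_nil_singleton (d : Char) : PySem.Chars.find [] [d] = -1 := by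
  rw [PySem.Chars.find_eq_neg_one_iff]
  simp

-- shift (i, lab) ↦ (i+1, lab) commutes with minByFst
theorem minByFst_shift (p : Int × String) (ps : List (Int × String)) :
    minByFst (p.1 + 1, p.2) (ps.map (fun q => (q.1 + 1, q.2))) =
      ((minByFst p ps).1 + 1, (minByFst p ps).2) := by
  induction ps generalizing p with
  | nil => simp [minByFst]
  | cons q qs ih =>
    simp only [List.map_cons, minByFst, List.foldl_cons]
    have h1 : (if q.1 + 1 < p.1 + 1 then ((q.1 + 1, q.2) : Int × String) else (p.1 + 1, p.2)) =
        ((if q.1 < p.1 then q else p).1 + 1, (if q.1 < p.1 then q else p).2) := by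
      by_cases h : q.1 < p.1
      · rw [if_pos h, if_pos (by omega)]
      · rw [if_neg h, if_neg (by omega)]
    simp only [minByFst] at ih
    rw [h1]
    exact ih _

theorem minByFst_of_all_ge (p : Int × String) (ps : List (Int × String))
    (h : ∀ q ∈ ps, ¬ q.1 < p.1) : minByFst p ps = p := by
  induction ps with
  | nil => rfl
  | cons q qs ih =>
    simp only [minByFst, List.foldl_cons, if_neg (h q (by simp))]
    exact ih fun r hr => h r (by simp [hr])

theorem minByFst_cons (p q : Int × String) (ps : List (Int × String)) :
    minByFst p (q :: ps) = minByFst (if q.1 < p.1 then q else p) ps := rfl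

theorem filter_shift (xs : List (Int × String)) (h : ∀ p ∈ xs, -1 ≤ p.1) :
    ((xs.map (fun q => ((if q.1 = -1 then -1 else q.1 + 1 : Int), q.2))).filter
        (fun p => p.1 ≠ -1)) =
      (xs.filter (fun p => p.1 ≠ -1)).map (fun q => (q.1 + 1, q.2)) := by
  induction xs with
  | nil => rfl
  | cons p ps ih =>
    have hp := h p (by simp)
    by_cases h0 : p.1 = -1
    · simp only [List.map_cons, List.filter_cons, if_pos h0]
      simp only [ne_eq, not_true_eq_false, decide_false, h0]
      exact ih fun q hq => h q (by simp [hq])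
    · have h1 : ¬ (p.1 + 1 = -1) := by omega
      simp only [List.map_cons, List.filter_cons]
      simp [h0, h1]
      simpa using ih fun q hq => h q (by simp [hq])

theorem fpB_cons_shift (c : Char) (l : List Char)
    (hc : c ≠ ',' ∧ c ≠ '.' ∧ c ≠ '?') :
    fpB (c :: l) = (fpB l).map (fun q => (q.1 + 1, q.2)) := by
  obtain ⟨h1, h2, h3⟩ := hc
  unfold fpB
  rw [find_singleton_cons, find_singleton_cons, find_singleton_cons,
    if_neg h1, if_neg h2, if_neg h3]
  have key := filter_shift
    [(PySem.Chars.find l [','], "COMMA"), (PySem.Chars.find l ['.'], "PERIOD"),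
     (PySem.Chars.find l ['?'], "QUESTION")]
    (by
      intro p hp
      simp only [List.mem_cons, List.not_mem_nil, or_false] at hp
      rcases hp with h | h | h <;> subst h <;> exact PySem.Chars.neg_one_le_find l _)
  simp only [List.map_cons, List.map_nil] at key
  rw [key]
  cases hft : ([(PySem.Chars.find l [','], "COMMA"), (PySem.Chars.find l ['.'], "PERIOD"),
      (PySem.Chars.find l ['?'], "QUESTION")]).filter (fun p => p.1 ≠ -1) with
  | nil => rfl
  | cons p ps =>
    simp only [List.map_cons, pick, Option.map_some, Option.some.injEq]
    exact minByFst_shift p ps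

theorem fpB_eq_fp (l : List Char) : fpB l = (fp l).map (fun p => ((p.1 : Int), p.2)) := by
  induction l with
  | nil => simp [fpB, fp, pick, find_nil_singleton]
  | cons c l ih =>
    have ha := PySem.Chars.neg_one_le_find l [',']
    have hb := PySem.Chars.neg_one_le_find l ['.']
    have hd := PySem.Chars.neg_one_le_find l ['?']
    by_cases h1 : c = ','
    · unfold fpB
      rw [find_singleton_cons, find_singleton_cons, find_singleton_cons,
        if_pos h1, if_neg (show ¬ (c = '.') from by rw [h1]; decide),
        if_neg (show ¬ (c = '?') from by rw [h1]; decide)]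
      rw [List.filter_cons_of_pos (by decide)]
      have hall : ∀ q ∈ (([((if PySem.Chars.find l ['.'] = -1 then -1
              else PySem.Chars.find l ['.'] + 1 : Int), "PERIOD"),
            ((if PySem.Chars.find l ['?'] = -1 then -1
              else PySem.Chars.find l ['?'] + 1 : Int), "QUESTION")]).filter
              (fun p => p.1 ≠ -1)),
          ¬ q.1 < (((0 : Int), "COMMA")).1 := by
        intro q hq
        rw [List.mem_filter] at hq
        have h2 := hq.2
        have hm := hq.1
        simp only [List.mem_cons, List.not_mem_nil, or_false] at hm
        rcases hm with h | h <;> subst h <;> simp_all <;> omega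
      simp only [pick, minByFst_of_all_ge _ _ hall, fp, if_pos h1, Option.map_some, Nat.cast_zero]
    · by_cases h2 : c = '.'
      · unfold fpB
        rw [find_singleton_cons, find_singleton_cons, find_singleton_cons,
          if_neg h1, if_pos h2, if_neg (show ¬ (c = '?') from by rw [h2]; decide)]
        by_cases pa : PySem.Chars.find l [','] = -1
        · rw [if_pos pa, List.filter_cons_of_neg (by decide),
            List.filter_cons_of_pos (by decide)]
          have hall : ∀ q ∈ (([((if PySem.Chars.find l ['?'] = -1 then -1
                  else PySem.Chars.find l ['?'] + 1 : Int), "QUESTION")]).filter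
                  (fun p => p.1 ≠ -1)),
              ¬ q.1 < (((0 : Int), "PERIOD")).1 := by
            intro q hq
            rw [List.mem_filter] at hq
            have hh := hq.2
            have hm := List.mem_singleton.1 hq.1
            subst hm
            simp_all
            omega
          simp only [pick, minByFst_of_all_ge _ _ hall, fp, if_neg h1, if_pos h2,
            Option.map_some, Nat.cast_zero]
        · rw [if_neg pa, List.filter_cons_of_pos (by simp; omega),
            List.filter_cons_of_pos (by decide)]
          simp only [pick, minByFst_cons,
            if_pos (show ((0 : Int), "PERIOD").1 <
              ((PySem.Chars.find l [','] + 1, "COMMA") : Int × String).1 from by omega)]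
          have hall : ∀ q ∈ (([((if PySem.Chars.find l ['?'] = -1 then -1
                  else PySem.Chars.find l ['?'] + 1 : Int), "QUESTION")]).filter
                  (fun p => p.1 ≠ -1)),
              ¬ q.1 < (((0 : Int), "PERIOD")).1 := by
            intro q hq
            rw [List.mem_filter] at hq
            have hh := hq.2
            have hm := List.mem_singleton.1 hq.1
            subst hm
            simp_all
            omega
          simp only [minByFst_of_all_ge _ _ hall, fp, if_neg h1, if_pos h2, Option.map_some, Nat.cast_zero]
      · by_cases h3 : c = '?'
        · unfold fpB
          rw [find_singleton_cons, find_singleton_cons, find_singleton_cons,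
            if_neg h1, if_neg h2, if_pos h3]
          by_cases pa : PySem.Chars.find l [','] = -1
          · rw [if_pos pa, List.filter_cons_of_neg (by decide)]
            by_cases pb : PySem.Chars.find l ['.'] = -1
            · rw [if_pos pb, List.filter_cons_of_neg (by decide),
                List.filter_cons_of_pos (by decide)]
              simp only [pick, List.filter_nil, List.filter_nil, minByFst, List.foldl_nil, fp, if_neg h1, if_neg h2, if_pos h3,
                Option.map_some, Nat.cast_zero]
            · rw [if_neg pb, List.filter_cons_of_pos (by simp; omega),
                List.filter_cons_of_pos (by decide)]
              simp only [pick,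
                List.filter_nil, minByFst, fp, if_neg h1, if_neg h2, if_pos h3,
                Option.map_some, Nat.cast_zero]
              rw [List.foldl_cons, List.foldl_nil,
                if_pos (show ((0 : Int), "QUESTION").1 <
                  ((PySem.Chars.find l ['.'] + 1, "PERIOD") : Int × String).1 from by omega)]
          · rw [if_neg pa, List.filter_cons_of_pos (by simp; omega)]
            by_cases pb : PySem.Chars.find l ['.'] = -1
            · rw [if_pos pb, List.filter_cons_of_neg (by decide),
                List.filter_cons_of_pos (by decide)]
              simp only [pick,
                List.filter_nil, minByFst, fp, if_neg h1, if_neg h2, if_pos h3,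
                Option.map_some, Nat.cast_zero]
              rw [List.foldl_cons, List.foldl_nil,
                if_pos (show ((0 : Int), "QUESTION").1 <
                  ((PySem.Chars.find l [','] + 1, "COMMA") : Int × String).1 from by omega)]
            · rw [if_neg pb, List.filter_cons_of_pos (by simp; omega),
                List.filter_cons_of_pos (by decide)]
              have e : (((0 : Int), "QUESTION")).1 <
                  (if ((PySem.Chars.find l ['.'] + 1, "PERIOD") : Int × String).1 <
                      ((PySem.Chars.find l [','] + 1, "COMMA") : Int × String).1
                    then ((PySem.Chars.find l ['.'] + 1, "PERIOD") : Int × String)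
                    else (PySem.Chars.find l [','] + 1, "COMMA")).1 := by
                split <;> omega
              simp only [pick, List.filter_nil, minByFst, fp,
                if_neg h1, if_neg h2, if_pos h3, Option.map_some, Nat.cast_zero]
              rw [List.foldl_cons, List.foldl_cons, List.foldl_nil, if_pos e]
        · rw [fpB_cons_shift c l ⟨h1, h2, h3⟩, ih]
          simp only [fp, if_neg h1, if_neg h2, if_neg h3]
          cases fp l with
          | none => simp
          | some p =>
            obtain ⟨j, lab⟩ := p
            simp only [Option.map_some, Option.some.injEq, Prod.mk.injEq]
            exact ⟨by push_cast; ring, trivial⟩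

theorem convAux_eq_fp (t : String) (i : Nat) (rest : List Char) (h : t.toList.drop i = rest) :
    convAux t i rest =
      match fp rest with
      | none => t ++ "\t" ++ "O"
      | some (j, lab) => String.ofList (t.toList.take (i + j)) ++ "\t" ++ lab := by
  induction rest generalizing i with
  | nil => simp [convAux, fp]
  | cons c rs ih =>
    have hdrop : t.toList.drop (i + 1) = rs := by
      have := congrArg List.tail h
      simpa [List.tail_drop] using this
    by_cases h1 : c = ','
    · simp [convAux, fp, h1, PySem.Chars.slice_eq_listSlice, PySem.List.slice_to_natCast]
    · by_cases h2 : c = '.'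
      · simp [convAux, fp, h2, PySem.Chars.slice_eq_listSlice, PySem.List.slice_to_natCast]
      · by_cases h3 : c = '?'
        · simp [convAux, fp, h3, PySem.Chars.slice_eq_listSlice, PySem.List.slice_to_natCast]
        · simp only [convAux, fp, if_neg h1, if_neg h2, if_neg h3]
          rw [ih (i + 1) hdrop]
          cases hfp : fp rs with
          | none => simp
          | some p =>
            obtain ⟨j, lab⟩ := p
            simp only [Option.map_some]
            have : i + 1 + j = i + (j + 1) := by omega
            rw [this]

-- ===== VERDICT (by name: the statement is the Claim_ definition above) =====
theorem convert_word_spec : Claim_equal_convert_word := by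
  intro text _
  unfold Spec_convert_word convert_word convert_word_alt
  set t := PySem.Str.strip text with ht
  by_cases h0 : t = ""
  · simp [h0]
  · simp only [if_neg h0]
    have hB : ([(PySem.Str.find t ",", "COMMA"), (PySem.Str.find t ".", "PERIOD"),
          (PySem.Str.find t "?", "QUESTION")]).filter (fun p => p.1 ≠ -1)
        = ([(PySem.Chars.find t.toList [','], "COMMA"), (PySem.Chars.find t.toList ['.'], "PERIOD"),
          (PySem.Chars.find t.toList ['?'], "QUESTION")]).filter (fun p => p.1 ≠ -1) := by
      rw [PySem.Str.find_eq, PySem.Str.find_eq, PySem.Str.find_eq]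
      have e1 : ("," : String).toList = [','] := by decide
      have e2 : ("." : String).toList = ['.'] := by decide
      have e3 : ("?" : String).toList = ['?'] := by decide
      rw [e1, e2, e3]
    rw [convAux_eq_fp t 0 t.toList (by simp)]
    have hfpB := fpB_eq_fp t.toList
    unfold fpB at hfpB
    rw [hB]
    cases hfp : fp t.toList with
    | none =>
      rw [hfp] at hfpB
      simp only [Option.map_none] at hfpB
      cases hflt : ([(PySem.Chars.find t.toList [','], "COMMA"), (PySem.Chars.find t.toList ['.'], "PERIOD"),
          (PySem.Chars.find t.toList ['?'], "QUESTION")]).filter (fun p => p.1 ≠ -1) with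
      | nil => rfl
      | cons p ps => rw [hflt] at hfpB; simp [pick] at hfpB
    | some p =>
      obtain ⟨j, lab⟩ := p
      rw [hfp] at hfpB
      simp only [Option.map_some] at hfpB
      cases hflt : ([(PySem.Chars.find t.toList [','], "COMMA"), (PySem.Chars.find t.toList ['.'], "PERIOD"),
          (PySem.Chars.find t.toList ['?'], "QUESTION")]).filter (fun p => p.1 ≠ -1) with
      | nil => rw [hflt] at hfpB; simp [pick] at hfpB
      | cons q qs =>
        rw [hflt] at hfpB
        simp only [pick, Option.some.injEq] at hfpB
        simp only [hfpB]
        simp [PySem.Chars.slice_eq_listSlice, PySem.List.slice_to_natCast]
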